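-- pv_equiv track=rewrite | github.com/pop-inkling/Cryptography_Homework | Homework1_AES/s_box.py | Poly_Extend_Euclid
-- ===== SOURCE A (Python) =====
-- def find_high(a):
--     i = 0
--     while(a!=0):
--         i+=1
--         a=a>>1
--     return i-1
--
-- def poly_div(a,b):
--
--     b_len = find_high(b)
--     a_len = find_high(a)
--     q, r = 0, 0 #q为商，r为余数
--
--     while(a_len>=b_len):
--         q += 1<<(a_len-b_len)
--         r = a ^ (b<<(a_len-b_len))
--         a = r
--         a_len = find_high(a)
--     return q, r
--
-- def poly_multi(a,b,c=0b100011011):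
--     temp = 0
--     for i in range(find_high(b)+1):
--         if((b>>i)&0b1 == 0b1):
--             temp ^= a<<i
--     if(find_high(temp)>=find_high(c)):
--          q,temp = poly_div(temp,c)
--
--     return temp
--
-- def Poly_Extend_Euclid(a,b):
--     xinv1, yinv1 = 1, 0
--     x0, y0 = 0, 1
--     x1, y1 = 0, 0
--     q, r = poly_div(a,b)
--     while(r!=0):
--         x1 = xinv1^poly_multi(q,x0)
--         y1 = yinv1^poly_multi(q,y0)
--         xinv1, yinv1 = x0, y0
--         x0, y0 = x1, y1
--         a = b
--         b = r
--         q, r = poly_div(a,b)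
--     return y0
-- ===== SOURCE B (Python) =====
-- def deg(a):
--     """Degree of the GF(2) polynomial a (-1 for a == 0), via int.bit_length."""
--     return a.bit_length() - 1
--
-- def poly_div(a, b):
--     """GF(2) polynomial divmod, recursively; like A's helper it reports the
--     remainder as 0 when no division step happens (deg(a) < deg(b))."""
--     if deg(a) < deg(b):
--         return 0, 0
--     return _divmod(a, b, deg(b))
--
-- def _divmod(a, b, db):
--     sh = deg(a) - db
--     r = a ^ (b << sh)
--     if deg(r) < db:
--         return 1 << sh, r
--     q, rr = _divmod(r, b, db)
--     return (1 << sh) + q, rr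
--
-- def poly_multi(a, b, c=0b100011011):
--     # carry-less multiply by shift-and-add, then one modular reduction
--     temp = 0
--     while b > 0:
--         if b & 1:
--             temp ^= a
--         a <<= 1
--         b >>= 1
--     if deg(temp) >= deg(c):
--         temp = poly_div(temp, c)[1]
--     return temp
--
-- def _quotients(a, b):
--     """The quotients of the GF(2) Euclid chain of (a, b), while remainders are nonzero."""
--     q, r = poly_div(a, b)
--     return [] if r == 0 else [q] + _quotients(b, r)
--
-- def Poly_Extend_Euclid(a, b):
--     # Two phases: collect the quotient chain, then fold the y-recurrence over it.
--     y_prev, y_cur = 0, 1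
--     for q in _quotients(a, b):
--         y_prev, y_cur = y_cur, y_prev ^ poly_multi(q, y_cur)
--     return y_cur
-- ===== Notes on version B (the rewrite author's own statement) =====
-- stated objective: simpler
-- what changed: B rebuilds every piece differently: degree via int.bit_length instead of a halving loop, recursive division with back-added quotient bits instead of an accumulator loop, shift-and-add carry-less multiplication instead of indexed bit tests over range(), and a two-phase main (collect the Euclid quotient chain recursively, then fold the y-recurrence over it) instead of A's fused six-variable loop that also tracks the unused x coefficients.
import Mathlib
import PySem

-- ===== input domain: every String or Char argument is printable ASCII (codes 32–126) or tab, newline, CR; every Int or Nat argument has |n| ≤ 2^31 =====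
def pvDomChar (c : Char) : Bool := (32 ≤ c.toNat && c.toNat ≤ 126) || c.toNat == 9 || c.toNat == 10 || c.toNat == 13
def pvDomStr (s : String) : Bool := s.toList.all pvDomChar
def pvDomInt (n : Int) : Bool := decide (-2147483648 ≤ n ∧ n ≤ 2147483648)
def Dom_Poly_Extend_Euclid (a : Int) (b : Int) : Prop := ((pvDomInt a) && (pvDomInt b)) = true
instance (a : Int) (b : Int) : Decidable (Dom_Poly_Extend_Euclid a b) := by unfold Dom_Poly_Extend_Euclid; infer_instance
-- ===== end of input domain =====

-- B replaces A's helpers and main loop wholesale: degree via int.bit_length instead of a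
-- halving loop, recursive division with back-added quotient bits instead of an accumulator
-- loop, shift-and-add multiplication instead of indexed bit tests, and a two-phase main
-- (collect the quotient chain, then fold the y-recurrence) instead of A's fused
-- six-variable loop.  Objective: simpler, same asymptotic cost.

-- ===== PORT A =====
-- fuel makes the Python while-loops total; on every input admitted by Pre_ the fuel is never exhausted
def findHighLoop : Nat → Int → Int → Int
  | 0, i, _ => i - 1
  | f + 1, i, a => if a ≠ 0 then findHighLoop f (i + 1) (a >>> (1 : Nat)) else i - 1

def findHigh (a : Int) : Int := findHighLoop 128 0 a

def polyDivLoop : Nat → Int → Int → Int → Int → Int → Int → Int × Int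
  | 0, _, _, q, r, _, _ => (q, r)
  | f + 1, b, bLen, q, r, a, aLen =>
    if aLen ≥ bLen then
      let q' := q + ((1 : Int) <<< (aLen - bLen).toNat)   -- shift count ≥ 0 under the guard
      let r' := PySem.Int.bxor a (b <<< (aLen - bLen).toNat)
      polyDivLoop f b bLen q' r' r' (findHigh r')
    else (q, r)

def polyDiv (a b : Int) : Int × Int :=
  polyDivLoop 128 b (findHigh b) 0 0 a (findHigh a)

def polyMulti (a b c : Int) : Int :=
  let temp := (List.range (findHigh b + 1).toNat).foldl
    (fun (temp : Int) (i : Nat) => if PySem.Int.band (b >>> i) 1 = 1 then PySem.Int.bxor temp (a <<< i) else temp) 0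
  if findHigh temp ≥ findHigh c then (polyDiv temp c).2 else temp

-- A's main loop over the state (xinv1, yinv1, x0, y0); each round recomputes q, r = poly_div(a, b)
def euclidLoopA : Nat → Int → Int → Int → Int → Int → Int → Int
  | 0, _, _, _, y0, _, _ => y0
  | f + 1, xinv1, yinv1, x0, y0, a, b =>
    let qr := polyDiv a b
    if qr.2 ≠ 0 then
      euclidLoopA f x0 y0 (PySem.Int.bxor xinv1 (polyMulti qr.1 x0 283)) (PySem.Int.bxor yinv1 (polyMulti qr.1 y0 283)) b qr.2
    else y0

def Poly_Extend_Euclid (a : Int) (b : Int) : Int :=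
  euclidLoopA 64 1 0 0 1 a b

-- ===== PORT B =====
-- deg(a) = a.bit_length() - 1 (PySem.Int.bitLength is Python's int.bit_length)
def degB (a : Int) : Int := (PySem.Int.bitLength a : Int) - 1

-- recursive divmod, quotient bits added on the way back out (fuel only totalises the recursion)
def divmodRec : Nat → Int → Int → Int → Int × Int
  | 0, a, _, _ => (0, a)
  | f + 1, a, b, db =>
    let sh := (degB a - db).toNat
    let r := PySem.Int.bxor a (b <<< sh)
    if degB r < db then ((1 : Int) <<< sh, r)
    else
      let p := divmodRec f r b db
      ((1 : Int) <<< sh + p.1, p.2)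

-- like A's helper, reports the remainder as 0 when no division step happens
def polyDivB (a b : Int) : Int × Int :=
  if degB a < degB b then (0, 0) else divmodRec 128 a b (degB b)

-- carry-less multiply by shift-and-add
def mulLoop (a b temp : Int) : Int :=
  if h : 0 < b then
    mulLoop (a <<< (1 : Nat)) (b >>> (1 : Nat))
      (if PySem.Int.band b 1 = 1 then PySem.Int.bxor temp a else temp)
  else temp
termination_by b.toNat
decreasing_by
  rcases b with m | m
  · have hm : 0 < m := by exact_mod_cast Int.ofNat_lt.mp h
    show (Int.ofNat (m >>> 1)).toNat < (Int.ofNat m).toNat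
    simp only [Nat.shiftRight_one]
    exact Nat.div_lt_self hm one_lt_two
  · simp [Int.negSucc_not_pos] at h

def polyMultiB (a b c : Int) : Int :=
  let temp := mulLoop a b 0
  if degB temp ≥ degB c then (polyDivB temp c).2 else temp

-- phase 1: the quotients of the Euclid chain, while remainders are nonzero
def quotChain : Nat → Int → Int → List Int
  | 0, _, _ => []
  | f + 1, a, b =>
    let p := polyDivB a b
    if p.2 = 0 then [] else p.1 :: quotChain f b p.2

-- phase 2: fold the y-recurrence (y_prev, y_cur) ← (y_cur, y_prev ^ q·y_cur) over the chain
def Poly_Extend_Euclid_alt (a : Int) (b : Int) : Int :=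
  ((quotChain 64 a b).foldl
    (fun (p : Int × Int) q => (p.2, PySem.Int.bxor p.1 (polyMultiB q p.2 283))) (0, 1)).2

-- ===== PRECONDITION & SPEC =====
-- Pre_ excludes exactly the inputs on which the Python A never returns: find_high loops
-- forever on a negative argument and poly_div loops forever when b = 0, so A terminates
-- precisely on 0 ≤ a and 0 < b.
def Pre_Poly_Extend_Euclid (a : Int) (b : Int) : Prop := 0 ≤ a ∧ 0 < b
instance (a : Int) (b : Int) : Decidable (Pre_Poly_Extend_Euclid a b) := by unfold Pre_Poly_Extend_Euclid; infer_instance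

def pvWitness_Poly_Extend_Euclid : Int × Int := (283, 5)

def Spec_Poly_Extend_Euclid (a : Int) (b : Int) (out : Int) : Prop := out = Poly_Extend_Euclid_alt a b
instance (a : Int) (b : Int) (out : Int) : Decidable (Spec_Poly_Extend_Euclid a b out) := by unfold Spec_Poly_Extend_Euclid; infer_instance

-- ===== CLAIM (what is proved, stated in full; the proofs are below) =====
def Claim_equal_Poly_Extend_Euclid : Prop := ∀ (a : Int) (b : Int), Dom_Poly_Extend_Euclid a b → Pre_Poly_Extend_Euclid a b → Spec_Poly_Extend_Euclid a b (Poly_Extend_Euclid a b)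

-- ===== LEMMAS AND PROOFS =====

theorem bitLength_pos {n : Int} (hn : n ≠ 0) : 1 ≤ PySem.Int.bitLength n := by
  by_contra hk
  have h1 := PySem.Int.lt_two_pow_bitLength n
  have h2 : PySem.Int.bitLength n = 0 := by omega
  rw [h2] at h1
  simp only [pow_zero, Nat.lt_one_iff, Int.natAbs_eq_zero] at h1
  exact hn h1

theorem bitLength_le_of_lt {n : Int} {k : Nat} (hn : 0 ≤ n) (h : n.toNat < 2 ^ k) :
    PySem.Int.bitLength n ≤ k := by
  rcases eq_or_ne n 0 with rfl | hne
  · simp [PySem.Int.bitLength_zero]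
  · by_contra hk
    have h1 := PySem.Int.two_pow_bitLength_le n hne
    have h2 : (2 : Nat) ^ k ≤ 2 ^ (PySem.Int.bitLength n - 1) :=
      Nat.pow_le_pow_right (by norm_num) (by omega)
    omega

theorem lt_of_bitLength_le {n : Int} {k : Nat} (hn : 0 ≤ n) (h : PySem.Int.bitLength n ≤ k) :
    n.toNat < 2 ^ k := by
  have h1 := PySem.Int.lt_two_pow_bitLength n
  have h2 : (2 : Nat) ^ PySem.Int.bitLength n ≤ 2 ^ k := Nat.pow_le_pow_right (by norm_num) h
  omega

theorem findHighLoop_eq : ∀ (f : Nat) (n : Int) (i : Int), 0 ≤ n → n.toNat < 2 ^ f →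
    findHighLoop f i n = i + (PySem.Int.bitLength n : Int) - 1 := by
  intro f
  induction f with
  | zero =>
    intro n i hn hlt
    have : n = 0 := by omega
    subst this
    simp [findHighLoop, PySem.Int.bitLength_zero]
  | succ f ih =>
    intro n i hn hlt
    rcases eq_or_ne n 0 with rfl | hne
    · simp [findHighLoop, PySem.Int.bitLength_zero]
    · obtain ⟨m, rfl⟩ := Int.eq_ofNat_of_zero_le hn
      have hm : 0 < m := by omega
      rw [findHighLoop]
      simp only [if_pos hne]
      have hshift : ((m : Int)) >>> (1 : Nat) = ((m >>> 1 : Nat) : Int) := rfl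
      rw [hshift, ih _ _ (by positivity) (by simp only [Nat.shiftRight_one]; omega)]
      rw [PySem.Int.bitLength_natCast hm]
      simp only [Nat.shiftRight_one]
      push_cast
      ring

-- A's find_high equals bit_length - 1 on the nonnegative integers the fuel covers
theorem findHigh_eq_degB {n : Int} (hn : 0 ≤ n) (hlt : n.toNat < 2 ^ 128) :
    findHigh n = degB n := by
  unfold findHigh degB
  rw [findHighLoop_eq 128 n 0 hn hlt]
  ring

-- top-bit cancellation: the xor of two polynomials of equal degree has smaller degree
theorem xor_lt_of_same_size {k x y : Nat} (hx1 : 2 ^ k ≤ x) (hx2 : x < 2 ^ (k + 1))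
    (hy1 : 2 ^ k ≤ y) (hy2 : y < 2 ^ (k + 1)) : x ^^^ y < 2 ^ k := by
  induction k generalizing x y with
  | zero =>
    have hx : x = 1 := by norm_num at hx1 hx2; omega
    have hy : y = 1 := by norm_num at hy1 hy2; omega
    subst hx hy
    simp
  | succ k ih =>
    have e1 : (2 : Nat) ^ (k + 1) = 2 * 2 ^ k := by ring
    have e2 : (2 : Nat) ^ (k + 2) = 2 * 2 ^ (k + 1) := by ring
    have hxd := ih (x := x / 2) (y := y / 2) (by omega) (by omega) (by omega) (by omega)
    have h1 : (x ^^^ y) / 2 = x / 2 ^^^ y / 2 := Nat.xor_div_two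
    omega

-- the xor step of the division: a true remainder step strictly lowers the degree
theorem step_r_bound {a bv : Int} (ha : 0 ≤ a) (hb : 0 < bv) (hd : degB bv ≤ degB a) :
    0 ≤ PySem.Int.bxor a (bv <<< (degB a - degB bv).toNat) ∧
    (PySem.Int.bxor a (bv <<< (degB a - degB bv).toNat)).toNat < 2 ^ (PySem.Int.bitLength a - 1) ∧
    PySem.Int.bitLength (PySem.Int.bxor a (bv <<< (degB a - degB bv).toNat)) < PySem.Int.bitLength a := by
  obtain ⟨x, rfl⟩ := Int.eq_ofNat_of_zero_le ha
  obtain ⟨y, rfl⟩ := Int.eq_ofNat_of_zero_le hb.le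
  have hy0 : 0 < y := by exact_mod_cast hb
  have hLb : 1 ≤ PySem.Int.bitLength (y : Int) := bitLength_pos (by exact_mod_cast hy0.ne')
  have hLab : PySem.Int.bitLength (y : Int) ≤ PySem.Int.bitLength (x : Int) := by
    unfold degB at hd; omega
  have hLa : 1 ≤ PySem.Int.bitLength (x : Int) := le_trans hLb hLab
  have hx0 : x ≠ 0 := by
    intro h; subst h
    simp only [Int.natCast_zero, PySem.Int.bitLength_zero] at hLa
    omega
  set La := PySem.Int.bitLength (x : Int) with hLadef
  set Lb := PySem.Int.bitLength (y : Int) with hLbdef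
  have hsh : (degB (x : Int) - degB (y : Int)).toNat = La - Lb := by
    unfold degB; omega
  have hcast : ((y : Int) <<< (La - Lb)) = ((y <<< (La - Lb) : Nat) : Int) := by
    exact_mod_cast Int.natCast_shiftLeft y (La - Lb)
  have hx1 : 2 ^ (La - 1) ≤ x := by
    have := PySem.Int.two_pow_bitLength_le (x : Int) (by exact_mod_cast hx0)
    simpa using this
  have hx2 : x < 2 ^ La := by
    have := PySem.Int.lt_two_pow_bitLength (x : Int)
    simpa using this
  have hy1 : 2 ^ (Lb - 1) ≤ y := by
    have := PySem.Int.two_pow_bitLength_le (y : Int) (by exact_mod_cast hy0.ne')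
    simpa using this
  have hy2 : y < 2 ^ Lb := by
    have := PySem.Int.lt_two_pow_bitLength (y : Int)
    simpa using this
  have hsl : y <<< (La - Lb) = y * 2 ^ (La - Lb) := Nat.shiftLeft_eq y (La - Lb)
  have hs1 : 2 ^ (La - 1) ≤ y * 2 ^ (La - Lb) := by
    calc 2 ^ (La - 1) = 2 ^ (Lb - 1) * 2 ^ (La - Lb) := by rw [← pow_add]; congr 1; omega
    _ ≤ y * 2 ^ (La - Lb) := Nat.mul_le_mul_right _ hy1
  have hs2 : y * 2 ^ (La - Lb) < 2 ^ La := by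
    calc y * 2 ^ (La - Lb) < 2 ^ Lb * 2 ^ (La - Lb) :=
          mul_lt_mul_of_pos_right hy2 (Nat.pow_pos (by norm_num))
    _ = 2 ^ La := by rw [← pow_add]; congr 1; omega
  have hmain : x ^^^ y <<< (La - Lb) < 2 ^ (La - 1) := by
    rw [hsl]
    have e : La - 1 + 1 = La := by omega
    exact xor_lt_of_same_size hx1 (by rw [e]; exact hx2) hs1 (by rw [e]; exact hs2)
  rw [hsh]
  have hxor : PySem.Int.bxor (x : Int) ((y : Int) <<< (La - Lb))
      = ((x ^^^ y <<< (La - Lb) : Nat) : Int) := by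
    show PySem.Int.bxor (x : Int) ((y <<< (La - Lb) : Nat) : Int) = _
    exact PySem.Int.bxor_natCast x (y <<< (La - Lb))
  rw [hxor]
  refine ⟨by positivity, by simpa using hmain, ?_⟩
  have := bitLength_le_of_lt (n := ((x ^^^ y <<< (La - Lb) : Nat) : Int)) (by positivity)
    (by simpa using hmain)
  omega

-- one-step unfolding lemmas, to control fuel unfolding during the lockstep induction
theorem polyDivLoop_succ (f : Nat) (b bLen q r a aLen : Int) :
    polyDivLoop (f + 1) b bLen q r a aLen =
      if aLen ≥ bLen then
        polyDivLoop f b bLen (q + ((1 : Int) <<< (aLen - bLen).toNat))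
          (PySem.Int.bxor a (b <<< (aLen - bLen).toNat))
          (PySem.Int.bxor a (b <<< (aLen - bLen).toNat))
          (findHigh (PySem.Int.bxor a (b <<< (aLen - bLen).toNat)))
      else (q, r) := rfl

theorem divmodRec_succ (f : Nat) (a b db : Int) :
    divmodRec (f + 1) a b db =
      if degB (PySem.Int.bxor a (b <<< (degB a - db).toNat)) < db then
        ((1 : Int) <<< (degB a - db).toNat, PySem.Int.bxor a (b <<< (degB a - db).toNat))
      else
        ((1 : Int) <<< (degB a - db).toNat
            + (divmodRec f (PySem.Int.bxor a (b <<< (degB a - db).toNat)) b db).1,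
          (divmodRec f (PySem.Int.bxor a (b <<< (degB a - db).toNat)) b db).2) := rfl

-- A's division loop from a state with positive fuel equals B's recursive divmod, fuel for fuel
theorem polyDivLoop_eq_divmodRec (bv : Int) (hb : 0 < bv) :
    ∀ (f : Nat) (a q r0 : Int), 0 ≤ a → a.toNat < 2 ^ 120 → degB bv ≤ degB a →
      polyDivLoop (f + 1) bv (degB bv) q r0 a (degB a) =
        (q + (divmodRec (f + 1) a bv (degB bv)).1, (divmodRec (f + 1) a bv (degB bv)).2) := by
  intro f
  induction f with
  | zero =>
    intro a q r0 ha haB hd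
    obtain ⟨hr0, hrB, hrL⟩ := step_r_bound ha hb hd
    rw [polyDivLoop_succ, divmodRec_succ, if_pos hd]
    by_cases h2 : degB (PySem.Int.bxor a (bv <<< (degB a - degB bv).toNat)) < degB bv
    · rw [if_pos h2]
      rfl
    · rw [if_neg h2]
      show (_, _) = (_, _)
      simp [divmodRec]
  | succ f ih =>
    intro a q r0 ha haB hd
    obtain ⟨hr0, hrB, hrL⟩ := step_r_bound ha hb hd
    have hLa : PySem.Int.bitLength a ≤ 120 := bitLength_le_of_lt ha haB
    have hfh : findHigh (PySem.Int.bxor a (bv <<< (degB a - degB bv).toNat))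
        = degB (PySem.Int.bxor a (bv <<< (degB a - degB bv).toNat)) := by
      apply findHigh_eq_degB hr0
      have h2 : (2 : Nat) ^ (PySem.Int.bitLength a - 1) ≤ 2 ^ 128 :=
        Nat.pow_le_pow_right (by norm_num) (by omega)
      omega
    rw [polyDivLoop_succ, divmodRec_succ, if_pos hd, hfh]
    by_cases h2 : degB (PySem.Int.bxor a (bv <<< (degB a - degB bv).toNat)) < degB bv
    · rw [if_pos h2, polyDivLoop_succ, if_neg (not_le.2 h2)]
    · rw [if_neg h2]
      rw [ih _ _ _ hr0 (by
          have h3 : (2 : Nat) ^ (PySem.Int.bitLength a - 1) ≤ 2 ^ 120 :=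
            Nat.pow_le_pow_right (by norm_num) (by omega)
          omega) (not_lt.1 h2)]
      show (_, _) = (_, _)
      simp [add_assoc]

theorem polyDiv_eq_polyDivB {a b : Int} (ha : 0 ≤ a) (hb : 0 < b)
    (haB : a.toNat < 2 ^ 120) (hbB : b.toNat < 2 ^ 120) :
    polyDiv a b = polyDivB a b := by
  unfold polyDiv polyDivB
  rw [findHigh_eq_degB ha (by omega), findHigh_eq_degB hb.le (by omega)]
  by_cases hc : degB a < degB b
  · rw [if_pos hc]
    show polyDivLoop (127 + 1) b (degB b) 0 0 a (degB a) = (0, 0)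
    rw [polyDivLoop_succ, if_neg (not_le.2 hc)]
  · rw [if_neg hc]
    show polyDivLoop (127 + 1) b (degB b) 0 0 a (degB a) = divmodRec (127 + 1) a b (degB b)
    rw [polyDivLoop_eq_divmodRec b hb 127 a 0 0 ha haB (not_lt.1 hc)]
    simp

-- the second component of B's divmod is a true remainder: nonnegative, of degree < deg b
theorem divmodRec_snd_bound (bv : Int) (hb : 0 < bv) :
    ∀ (f : Nat) (a : Int), 0 ≤ a → degB bv ≤ degB a → PySem.Int.bitLength a ≤ f →
      0 ≤ (divmodRec f a bv (degB bv)).2 ∧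
        PySem.Int.bitLength (divmodRec f a bv (degB bv)).2 < PySem.Int.bitLength bv := by
  intro f
  induction f with
  | zero =>
    intro a ha hd hf
    exfalso
    have hLb := bitLength_pos hb.ne'
    unfold degB at hd
    omega
  | succ f ih =>
    intro a ha hd hf
    obtain ⟨hr0, hrB, hrL⟩ := step_r_bound ha hb hd
    rw [divmodRec_succ]
    by_cases h2 : degB (PySem.Int.bxor a (bv <<< (degB a - degB bv).toNat)) < degB bv
    · rw [if_pos h2]
      refine ⟨hr0, ?_⟩
      show PySem.Int.bitLength (PySem.Int.bxor a (bv <<< (degB a - degB bv).toNat)) < _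
      have hLb := bitLength_pos hb.ne'
      set r := PySem.Int.bxor a (bv <<< (degB a - degB bv).toNat) with hrdef
      unfold degB at h2
      omega
    · rw [if_neg h2]
      exact ih _ hr0 (not_lt.1 h2) (by omega)

-- crude quotient bound: every added bit is below 2^31, fuel bounds the number of summands
theorem divmodRec_fst_bound (bv : Int) (hb : 0 < bv) :
    ∀ (f : Nat) (a : Int), 0 ≤ a → a.toNat < 2 ^ 32 → degB bv ≤ degB a →
      0 ≤ (divmodRec f a bv (degB bv)).1 ∧ (divmodRec f a bv (degB bv)).1.toNat ≤ f * 2 ^ 31 := by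
  intro f
  induction f with
  | zero =>
    intro a ha haB hd
    simp [divmodRec]
  | succ f ih =>
    intro a ha haB hd
    obtain ⟨hr0, hrB, hrL⟩ := step_r_bound ha hb hd
    have hLa : PySem.Int.bitLength a ≤ 32 := bitLength_le_of_lt ha haB
    have hLb := bitLength_pos hb.ne'
    have hsh31 : (degB a - degB bv).toNat ≤ 31 := by unfold degB; omega
    have h1s : ((1 : Int) <<< (degB a - degB bv).toNat)
        = ((2 ^ (degB a - degB bv).toNat : Nat) : Int) := by
      show (((1 : Nat) : Int) <<< (degB a - degB bv).toNat) = _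
      rw [show ((1 : Nat) : Int) <<< (degB a - degB bv).toNat
            = ((1 <<< (degB a - degB bv).toNat : Nat) : Int) from rfl]
      rw [Nat.shiftLeft_eq, one_mul]
    have hpow : (2 : Nat) ^ (degB a - degB bv).toNat ≤ 2 ^ 31 :=
      Nat.pow_le_pow_right (by norm_num) hsh31
    rw [divmodRec_succ]
    by_cases h2 : degB (PySem.Int.bxor a (bv <<< (degB a - degB bv).toNat)) < degB bv
    · rw [if_pos h2]
      constructor
      · show (0 : Int) ≤ (1 : Int) <<< (degB a - degB bv).toNat
        rw [h1s]; positivity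
      · show ((1 : Int) <<< (degB a - degB bv).toNat).toNat ≤ (f + 1) * 2 ^ 31
        rw [h1s, Int.toNat_natCast]
        calc (2 : Nat) ^ (degB a - degB bv).toNat ≤ 2 ^ 31 := hpow
        _ ≤ (f + 1) * 2 ^ 31 := Nat.le_mul_of_pos_left _ (Nat.succ_pos f)
    · rw [if_neg h2]
      have hrB32 : (PySem.Int.bxor a (bv <<< (degB a - degB bv).toNat)).toNat < 2 ^ 32 := by
        have : (2 : Nat) ^ (PySem.Int.bitLength a - 1) ≤ 2 ^ 32 :=
          Nat.pow_le_pow_right (by norm_num) (by omega)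
        omega
      obtain ⟨hp0, hpB⟩ := ih _ hr0 hrB32 (not_lt.1 h2)
      constructor
      · have : (0 : Int) ≤ (1 : Int) <<< (degB a - degB bv).toNat := by rw [h1s]; positivity
        exact add_nonneg this hp0
      · rw [h1s]
        rw [Int.toNat_add (by positivity) hp0, Int.toNat_natCast]
        have hexp : (f + 1) * 2 ^ 31 = 2 ^ 31 + f * 2 ^ 31 := by ring
        omega

-- A's indexed multiply loop equals B's shift-and-add loop
theorem foldl_eq_mulLoop : ∀ (m : Nat) (a t : Int), 0 ≤ a →
    (List.range (PySem.Int.bitLength (m : Int))).foldl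
      (fun (temp : Int) (i : Nat) => if PySem.Int.band ((m : Int) >>> i) 1 = 1 then PySem.Int.bxor temp (a <<< i) else temp) t
      = mulLoop a (m : Int) t := by
  intro m
  induction m using Nat.strong_induction_on with
  | _ m ih =>
    intro a t ha
    rcases Nat.eq_zero_or_pos m with rfl | hm
    · rw [mulLoop, dif_neg (show ¬ (0 : Int) < ((0 : Nat) : Int) by simp)]
      simp [PySem.Int.bitLength_zero]
    · obtain ⟨n, rfl⟩ := Int.eq_ofNat_of_zero_le ha
      rw [PySem.Int.bitLength_natCast hm, List.range_succ_eq_map, List.foldl_cons, List.foldl_map]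
      have hfun : (fun (temp : Int) (i : Nat) =>
            if PySem.Int.band ((m : Int) >>> (Nat.succ i)) 1 = 1
            then PySem.Int.bxor temp ((n : Int) <<< (Nat.succ i)) else temp)
          = (fun (temp : Int) (i : Nat) =>
            if PySem.Int.band (((m / 2 : Nat) : Int) >>> i) 1 = 1
            then PySem.Int.bxor temp (((n <<< 1 : Nat) : Int) <<< i) else temp) := by
        funext temp i
        have eN1 : m >>> Nat.succ i = (m / 2) >>> i := by
          rw [Nat.succ_eq_add_one, Nat.add_comm i 1, Nat.shiftRight_add, Nat.shiftRight_one]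
        have eN2 : n <<< Nat.succ i = n <<< 1 <<< i := by
          rw [Nat.succ_eq_add_one, Nat.add_comm i 1, Nat.shiftLeft_add]
        simp only [Int.shiftRight_natCast_right, ← Int.natCast_shiftRight,
          ← Int.natCast_shiftLeft, eN1, eN2]
      rw [hfun]
      rw [ih (m / 2) (Nat.div_lt_self hm one_lt_two) ((n <<< 1 : Nat) : Int) _ (by positivity)]
      conv_rhs => rw [mulLoop]
      rw [dif_pos (show (0 : Int) < (m : Int) by exact_mod_cast hm)]
      simp only [Int.shiftRight_natCast_right, ← Int.natCast_shiftRight,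
        ← Int.natCast_shiftLeft, Nat.shiftRight_one, Nat.shiftRight_zero, Nat.shiftLeft_zero]

theorem mulLoop_bound : ∀ (m : Nat) (a t : Int) (k : Nat), 0 ≤ a → 0 ≤ t →
    t.toNat < 2 ^ k → a.toNat * 2 ^ PySem.Int.bitLength (m : Int) ≤ 2 ^ k →
    0 ≤ mulLoop a (m : Int) t ∧ (mulLoop a (m : Int) t).toNat < 2 ^ k := by
  intro m
  induction m using Nat.strong_induction_on with
  | _ m ih =>
    intro a t k ha ht htk hak
    rcases Nat.eq_zero_or_pos m with rfl | hm
    · rw [mulLoop, dif_neg (show ¬ (0 : Int) < ((0 : Nat) : Int) by simp)]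
      exact ⟨ht, htk⟩
    · obtain ⟨n, rfl⟩ := Int.eq_ofNat_of_zero_le ha
      obtain ⟨tN, rfl⟩ := Int.eq_ofNat_of_zero_le ht
      have hL : 1 ≤ PySem.Int.bitLength (m : Int) :=
        bitLength_pos (by exact_mod_cast hm.ne')
      have hL2 : 2 ≤ 2 ^ PySem.Int.bitLength (m : Int) := by
        calc (2 : Nat) = 2 ^ 1 := by norm_num
        _ ≤ 2 ^ PySem.Int.bitLength (m : Int) := Nat.pow_le_pow_right (by norm_num) hL
      have h2n : 2 * n ≤ 2 ^ k := by
        have := Nat.mul_le_mul_left n hL2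
        simp only [Int.toNat_natCast] at hak
        omega
      have hnk : n < 2 ^ k := by omega
      rw [mulLoop, dif_pos (show (0 : Int) < (m : Int) by exact_mod_cast hm)]
      have huall : ∀ u : Int, u = (if PySem.Int.band (m : Int) 1 = 1
          then PySem.Int.bxor (tN : Int) (n : Int) else (tN : Int)) →
          0 ≤ u ∧ u.toNat < 2 ^ k := by
        intro u hu
        subst hu
        split
        · rw [PySem.Int.bxor_natCast]
          refine ⟨by positivity, ?_⟩
          simp only [Int.toNat_natCast]
          exact Nat.xor_lt_two_pow (by simpa using htk) hnk
        · exact ⟨by positivity, by simpa using htk⟩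
      obtain ⟨hu0, huk⟩ := huall _ rfl
      have hLhalf := PySem.Int.bitLength_natCast hm
      have hak2 : ((n : Int) <<< (1 : Nat)).toNat * 2 ^ PySem.Int.bitLength ((m / 2 : Nat) : Int) ≤ 2 ^ k := by
        have hsl : ((n : Int) <<< (1 : Nat)) = ((n <<< 1 : Nat) : Int) := rfl
        rw [hsl, Int.toNat_natCast, Nat.shiftLeft_eq]
        simp only [Int.toNat_natCast] at hak
        calc n * 2 ^ 1 * 2 ^ PySem.Int.bitLength ((m / 2 : Nat) : Int)
            = n * 2 ^ (PySem.Int.bitLength ((m / 2 : Nat) : Int) + 1) := by rw [pow_succ]; ring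
        _ = n * 2 ^ PySem.Int.bitLength (m : Int) := by rw [hLhalf]
        _ ≤ 2 ^ k := hak
      have hshow : ((m : Int) >>> (1 : Nat)) = ((m / 2 : Nat) : Int) := by
        show ((m >>> 1 : Nat) : Int) = ((m / 2 : Nat) : Int)
        rw [Nat.shiftRight_one]
      rw [hshow]
      have ha2 : (0 : Int) ≤ (n : Int) <<< (1 : Nat) := by
        simp only [← Int.natCast_shiftLeft]
        positivity
      exact ih (m / 2) (Nat.div_lt_self hm one_lt_two) _ _ k ha2 hu0 huk hak2


theorem polyDivB_snd_bound {a b : Int} (ha : 0 ≤ a) (hb : 0 < b)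
    (hf : PySem.Int.bitLength a ≤ 128) :
    0 ≤ (polyDivB a b).2 ∧ PySem.Int.bitLength (polyDivB a b).2 < PySem.Int.bitLength b := by
  unfold polyDivB
  split
  · exact ⟨le_rfl, by simpa [PySem.Int.bitLength_zero] using bitLength_pos hb.ne'⟩
  · rename_i hg
    exact divmodRec_snd_bound b hb 128 a ha (not_lt.1 hg) hf

theorem polyDivB_fst_bound {a b : Int} (ha : 0 ≤ a) (hb : 0 < b) (haB : a.toNat < 2 ^ 32) :
    0 ≤ (polyDivB a b).1 ∧ (polyDivB a b).1.toNat ≤ 128 * 2 ^ 31 := by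
  unfold polyDivB
  split
  · exact ⟨le_rfl, by norm_num⟩
  · rename_i hg
    exact divmodRec_fst_bound b hb 128 a ha haB (not_lt.1 hg)

theorem polyMulti_eq_polyMultiB {a b : Int} (ha : 0 ≤ a) (hb : 0 ≤ b)
    (haB : PySem.Int.bitLength a ≤ 40) (hbB : PySem.Int.bitLength b ≤ 10) :
    polyMulti a b 283 = polyMultiB a b 283 := by
  obtain ⟨mb, rfl⟩ := Int.eq_ofNat_of_zero_le hb
  have hbLt : ((mb : Int)).toNat < 2 ^ 128 := lt_of_bitLength_le hb (le_trans hbB (by norm_num))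
  have haLt : a.toNat < 2 ^ 40 := lt_of_bitLength_le ha haB
  have hfb : findHigh (mb : Int) = degB (mb : Int) := findHigh_eq_degB hb hbLt
  have hidx : (degB (mb : Int) + 1).toNat = PySem.Int.bitLength (mb : Int) := by
    unfold degB; omega
  have hmul : a.toNat * 2 ^ PySem.Int.bitLength (mb : Int) ≤ 2 ^ 50 := by
    calc a.toNat * 2 ^ PySem.Int.bitLength (mb : Int) ≤ 2 ^ 40 * 2 ^ 10 :=
      Nat.mul_le_mul haLt.le (Nat.pow_le_pow_right (by norm_num) hbB)
    _ = 2 ^ 50 := by norm_num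
  obtain ⟨htm0, htmB⟩ := mulLoop_bound mb a 0 50 ha le_rfl (by norm_num) hmul
  simp only [polyMulti, polyMultiB]
  rw [hfb, hidx, foldl_eq_mulLoop mb a 0 ha]
  have hft : findHigh (mulLoop a (mb : Int) 0) = degB (mulLoop a (mb : Int) 0) :=
    findHigh_eq_degB htm0 (by
      have h50 : (2 : Nat) ^ 50 ≤ 2 ^ 128 := Nat.pow_le_pow_right (by norm_num) (by norm_num)
      omega)
  rw [hft, show findHigh (283 : Int) = degB (283 : Int) from by decide]
  by_cases hg : degB (mulLoop a (mb : Int) 0) ≥ degB 283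
  · rw [if_pos hg, if_pos hg, polyDiv_eq_polyDivB htm0 (by norm_num)
      (by
        have h50 : (2 : Nat) ^ 50 ≤ 2 ^ 120 := Nat.pow_le_pow_right (by norm_num) (by norm_num)
        omega)
      (by norm_num)]
  · rw [if_neg hg, if_neg hg]

-- the reduced product is a polynomial of degree < 8
theorem polyMultiB_bound {a b : Int} (ha : 0 ≤ a) (hb : 0 ≤ b)
    (haB : PySem.Int.bitLength a ≤ 40) (hbB : PySem.Int.bitLength b ≤ 10) :
    0 ≤ polyMultiB a b 283 ∧ (polyMultiB a b 283).toNat < 2 ^ 8 := by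
  obtain ⟨mb, rfl⟩ := Int.eq_ofNat_of_zero_le hb
  have haLt : a.toNat < 2 ^ 40 := lt_of_bitLength_le ha haB
  have hmul : a.toNat * 2 ^ PySem.Int.bitLength (mb : Int) ≤ 2 ^ 50 := by
    calc a.toNat * 2 ^ PySem.Int.bitLength (mb : Int) ≤ 2 ^ 40 * 2 ^ 10 :=
      Nat.mul_le_mul haLt.le (Nat.pow_le_pow_right (by norm_num) hbB)
    _ = 2 ^ 50 := by norm_num
  obtain ⟨htm0, htmB⟩ := mulLoop_bound mb a 0 50 ha le_rfl (by norm_num) hmul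
  have htL : PySem.Int.bitLength (mulLoop a (mb : Int) 0) ≤ 50 := bitLength_le_of_lt htm0 htmB
  have h283 : PySem.Int.bitLength (283 : Int) = 9 := by decide
  simp only [polyMultiB]
  by_cases hg : degB (mulLoop a (mb : Int) 0) ≥ degB 283
  · rw [if_pos hg]
    have hsnd := polyDivB_snd_bound (b := 283) htm0 (by norm_num) (by omega)
    refine ⟨hsnd.1, ?_⟩
    exact lt_of_bitLength_le hsnd.1 (by omega)
  · rw [if_neg hg]
    have hdeg : degB (mulLoop a (mb : Int) 0) < degB 283 := not_le.1 hg
    have hbl : PySem.Int.bitLength (mulLoop a (mb : Int) 0) ≤ 8 := by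
      unfold degB at hdeg; omega
    exact ⟨htm0, lt_of_bitLength_le htm0 hbl⟩

-- A's main loop equals the fold of the y-recurrence over B's quotient chain, fuel for fuel
theorem euclidLoopA_eq_fold : ∀ (f : Nat) (a b xinv1 yinv1 x0 y0 : Int),
    0 ≤ a → a.toNat < 2 ^ 32 → 0 < b → b.toNat < 2 ^ 32 →
    0 ≤ yinv1 → yinv1.toNat < 2 ^ 9 → 0 ≤ y0 → y0.toNat < 2 ^ 9 →
    euclidLoopA f xinv1 yinv1 x0 y0 a b =
      ((quotChain f a b).foldl
        (fun (p : Int × Int) q => (p.2, PySem.Int.bxor p.1 (polyMultiB q p.2 283))) (yinv1, y0)).2 := by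
  intro f
  induction f with
  | zero =>
    intro a b xinv1 yinv1 x0 y0 _ _ _ _ _ _ _ _
    simp [euclidLoopA, quotChain]
  | succ f ih =>
    intro a b xinv1 yinv1 x0 y0 ha haB hb hbB hyi0 hyiB hy0 hyB
    have h120 : (2 : Nat) ^ 32 ≤ 2 ^ 120 := Nat.pow_le_pow_right (by norm_num) (by norm_num)
    have hDEq : polyDiv a b = polyDivB a b :=
      polyDiv_eq_polyDivB ha hb (by omega) (by omega)
    simp only [euclidLoopA, quotChain, hDEq]
    by_cases hr : (polyDivB a b).2 = 0
    · simp [hr]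
    · simp only [ne_eq, hr, not_false_eq_true, if_pos]
      obtain ⟨hq0, hqB⟩ := polyDivB_fst_bound ha hb haB
      have hqL : PySem.Int.bitLength (polyDivB a b).1 ≤ 40 :=
        bitLength_le_of_lt hq0 (by
          have : (128 : Nat) * 2 ^ 31 < 2 ^ 40 := by norm_num
          omega)
      have hyL : PySem.Int.bitLength y0 ≤ 10 :=
        le_trans (bitLength_le_of_lt hy0 hyB) (by norm_num)
      rw [show polyMulti (polyDivB a b).1 y0 283 = polyMultiB (polyDivB a b).1 y0 283 from
        polyMulti_eq_polyMultiB hq0 hy0 hqL hyL]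
      obtain ⟨hm0, hmB⟩ := polyMultiB_bound hq0 hy0 hqL hyL
      obtain ⟨hr0, hrL⟩ := polyDivB_snd_bound ha hb (bitLength_le_of_lt ha (by omega))
      have hbL : PySem.Int.bitLength b ≤ 32 := bitLength_le_of_lt hb.le hbB
      have hY0 : 0 ≤ PySem.Int.bxor yinv1 (polyMultiB (polyDivB a b).1 y0 283) := by
        rw [PySem.Int.bxor_of_nonneg hyi0 hm0]
        positivity
      have hYB : (PySem.Int.bxor yinv1 (polyMultiB (polyDivB a b).1 y0 283)).toNat < 2 ^ 9 := by
        rw [PySem.Int.bxor_of_nonneg hyi0 hm0, Int.toNat_natCast]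
        exact Nat.xor_lt_two_pow hyiB (by
          have : (2 : Nat) ^ 8 ≤ 2 ^ 9 := by norm_num
          omega)
      exact ih b (polyDivB a b).2 x0 y0 _ _ hb.le hbB
        (lt_of_le_of_ne hr0 (Ne.symm hr))
        (lt_of_bitLength_le hr0 (by omega))
        hy0 hyB hY0 hYB

-- ===== VERDICT (by name: the statement is the Claim_ definition above) =====
theorem Poly_Extend_Euclid_spec : Claim_equal_Poly_Extend_Euclid := by
  intro a b hdom hpre
  unfold Spec_Poly_Extend_Euclid Poly_Extend_Euclid Poly_Extend_Euclid_alt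
  obtain ⟨ha, hb⟩ := hpre
  have hdom' : a ≤ 2147483648 ∧ b ≤ 2147483648 := by
    unfold Dom_Poly_Extend_Euclid pvDomInt at hdom
    simp only [Bool.and_eq_true, decide_eq_true_eq] at hdom
    exact ⟨hdom.1.2, hdom.2.2⟩
  have haB : a.toNat < 2 ^ 32 := by omega
  have hbB : b.toNat < 2 ^ 32 := by omega
  exact euclidLoopA_eq_fold 64 a b 1 0 0 1 ha haB hb hbB (by omega) (by norm_num) (by omega) (by norm_num)
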